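-- pv_equiv track=rewrite | github.com/SatoshiAI-Lab/satoshi-gpt | datasource/active_infos.py | get_informations_by_score
-- ===== SOURCE A (Python) =====
-- def get_informations_by_score(informations: list):
--     index = 4
--
--     total_length = 80
--     result_list = []
--     score_4 = []
--     score_3 = []
--     score_2 = []
--     score_1 = []
--     score_0 = []
--
--     for info in informations:
--         if info[index] == 4 and len(score_4) < total_length / 2 + 1:
--             result_list.append(info)
--             score_4.append(info)
--
--     for info in informations:
--         if info[index] == 3 and len(score_3) < total_length / 2 + 1:
--             result_list.append(info)
--             score_3.append(info)
--
--     if len(result_list) < total_length: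
--         left_supply = total_length - len(result_list)
--         for info in informations:
--             if info[index] == 2 and len(score_2) < left_supply:
--                 result_list.append(info)
--                 score_2.append(info)
--
--     if len(result_list) < total_length:
--         left_supply = total_length - len(result_list)
--         for info in informations:
--             if info[index] == 1 and len(score_1) < left_supply:
--                 result_list.append(info)
--                 score_1.append(info)
--
--     if len(result_list) < total_length:
--         left_supply = total_length - len(result_list)
--         for info in informations:
--             if info[index] == 0 and len(score_0) < left_supply:
--                 result_list.append(info)
--                 score_0.append(info)
--
--     return result_list
-- ===== SOURCE B (Python) =====
-- def get_informations_by_score(informations: list):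
--     b4, b3, b2, b1, b0 = [], [], [], [], []
--     for info in informations:
--         s = info[4]
--         if s == 4:
--             b4.append(info)
--         elif s == 3:
--             b3.append(info)
--         elif s == 2:
--             b2.append(info)
--         elif s == 1:
--             b1.append(info)
--         elif s == 0:
--             b0.append(info)
--     result = b4[:41] + b3[:41]
--     for bucket in (b2, b1, b0):
--         if len(result) < 80:
--             result += bucket[:80 - len(result)]
--     return result
-- ===== Notes on version B (the rewrite author's own statement) =====
-- stated objective: simpler
-- what changed: Replaces A's five separate passes over informations (each with per-bucket count guards) by a single bucketing pass followed by slice-and-concatenate assembly (b4[:41] + b3[:41], then guarded fills from lower scores).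
import Mathlib
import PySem

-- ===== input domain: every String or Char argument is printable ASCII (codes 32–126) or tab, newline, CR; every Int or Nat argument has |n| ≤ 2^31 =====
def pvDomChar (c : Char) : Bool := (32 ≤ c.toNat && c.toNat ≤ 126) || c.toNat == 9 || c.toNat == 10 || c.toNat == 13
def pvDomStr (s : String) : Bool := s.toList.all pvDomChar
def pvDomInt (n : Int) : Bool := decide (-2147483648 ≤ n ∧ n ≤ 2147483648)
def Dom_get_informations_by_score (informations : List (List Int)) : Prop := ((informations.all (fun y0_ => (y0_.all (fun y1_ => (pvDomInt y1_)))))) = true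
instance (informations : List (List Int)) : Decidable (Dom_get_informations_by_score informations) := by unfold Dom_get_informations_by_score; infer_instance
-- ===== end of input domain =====

-- B replaces A's five guarded passes over `informations` by one bucketing pass plus
-- slice-and-concatenate assembly; objective: simpler (same exact return value on Pre_).


-- ===== PORT A =====
-- one iteration of one of A's five `for info in informations` loops:
-- state = (result_list, score_k); append to both when info[4] == score and the
-- bucket is still under the cap (`len < 41.0` on an int length is exactly `len < 41`).
def pvStepA (score : Int) (cap : Nat) (st : List (List Int) × List (List Int))
    (info : List Int) : List (List Int) × List (List Int) :=
  if PySem.List.pyGet? info 4 = some score ∧ st.2.length < cap then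
    (st.1 ++ [info], st.2 ++ [info])
  else st

def get_informations_by_score (informations : List (List Int)) : List (List Int) :=
  -- total_length = 80; total_length / 2 + 1 = 41.0, an integer-valued cap
  let st4 := informations.foldl (pvStepA 4 41) ([], [])
  let st3 := informations.foldl (pvStepA 3 41) (st4.1, [])
  let r2 := st3.1
  let r3 := if r2.length < 80 then
      (informations.foldl (pvStepA 2 (80 - r2.length)) (r2, [])).1 else r2
  let r4 := if r3.length < 80 then
      (informations.foldl (pvStepA 1 (80 - r3.length)) (r3, [])).1 else r3
  if r4.length < 80 then
      (informations.foldl (pvStepA 0 (80 - r4.length)) (r4, [])).1 else r4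

-- ===== PORT B =====
-- one bucketing pass: state = (b4, b3, b2, b1, b0)
def pvStepB (st : List (List Int) × List (List Int) × List (List Int) × List (List Int) × List (List Int))
    (info : List Int) : List (List Int) × List (List Int) × List (List Int) × List (List Int) × List (List Int) :=
  let s := PySem.List.pyGet? info 4
  if s = some 4 then (st.1 ++ [info], st.2.1, st.2.2.1, st.2.2.2.1, st.2.2.2.2)
  else if s = some 3 then (st.1, st.2.1 ++ [info], st.2.2.1, st.2.2.2.1, st.2.2.2.2)
  else if s = some 2 then (st.1, st.2.1, st.2.2.1 ++ [info], st.2.2.2.1, st.2.2.2.2)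
  else if s = some 1 then (st.1, st.2.1, st.2.2.1, st.2.2.2.1 ++ [info], st.2.2.2.2)
  else if s = some 0 then (st.1, st.2.1, st.2.2.1, st.2.2.2.1, st.2.2.2.2 ++ [info])
  else st

def get_informations_by_score_alt (informations : List (List Int)) : List (List Int) :=
  let bs := informations.foldl pvStepB ([], [], [], [], [])
  let r := bs.1.take 41 ++ bs.2.1.take 41
  let r := if r.length < 80 then r ++ bs.2.2.1.take (80 - r.length) else r
  let r := if r.length < 80 then r ++ bs.2.2.2.1.take (80 - r.length) else r
  if r.length < 80 then r ++ bs.2.2.2.2.take (80 - r.length) else r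

-- ===== PRECONDITION & SPEC =====
-- Pre_ excludes exactly the inputs where Python A raises IndexError (some info has
-- fewer than 5 elements, so info[4] fails); B raises there too.
def Pre_get_informations_by_score (informations : List (List Int)) : Prop :=
  ∀ info ∈ informations, 5 ≤ info.length
instance (informations : List (List Int)) : Decidable (Pre_get_informations_by_score informations) := by unfold Pre_get_informations_by_score; infer_instance

def pvWitness_get_informations_by_score : List (List Int) :=
  [[9, 8, 7, 6, 4], [1, 2, 3, 4, 3], [0, 0, 0, 0, 2]]

def Spec_get_informations_by_score (informations : List (List Int)) (out : List (List Int)) : Prop := out = get_informations_by_score_alt informations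
instance (informations : List (List Int)) (out : List (List Int)) : Decidable (Spec_get_informations_by_score informations out) := by unfold Spec_get_informations_by_score; infer_instance

-- ===== CLAIM (what is proved, stated in full; the proofs are below) =====
def Claim_equal_get_informations_by_score : Prop := ∀ (informations : List (List Int)), Dom_get_informations_by_score informations → Pre_get_informations_by_score informations → Spec_get_informations_by_score informations (get_informations_by_score informations)

-- ===== LEMMAS AND PROOFS =====

/-- infos with score `s` (at index 4), in encounter order. -/
def pvFiltered (s : Int) (infos : List (List Int)) : List (List Int) :=
  infos.filter (fun i => PySem.List.pyGet? i 4 = some s)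

/-- One of A's guarded loops equals "append the first `cap - b.length` matching infos". -/
theorem pvLoopA_eq (s : Int) (cap : Nat) :
    ∀ (infos : List (List Int)) (r b : List (List Int)),
      infos.foldl (pvStepA s cap) (r, b) =
        (r ++ (pvFiltered s infos).take (cap - b.length),
         b ++ (pvFiltered s infos).take (cap - b.length)) := by
  intro infos
  induction infos with
  | nil => intro r b; simp [pvFiltered]
  | cons i t ih =>
    intro r b
    by_cases hs : PySem.List.pyGet? i 4 = some s
    · by_cases hb : b.length < cap
      · have hcap : cap - b.length = (cap - (b.length + 1)) + 1 := by omega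
        simp [List.foldl_cons, pvStepA, hs, hb, ih, pvFiltered, hcap, List.take_succ_cons]
      · have hcap : cap - b.length = 0 := by omega
        have hcap' : cap - (b ++ [i]).length = 0 := by simp; omega
        simp [List.foldl_cons, pvStepA, hs, hb, ih, pvFiltered, hcap]
    · simp [List.foldl_cons, pvStepA, hs, ih, pvFiltered]

/-- B's single pass produces exactly the five per-score sublists. -/
theorem pvLoopB_eq :
    ∀ (infos : List (List Int)) (a4 a3 a2 a1 a0 : List (List Int)),
      infos.foldl pvStepB (a4, a3, a2, a1, a0) =
        (a4 ++ pvFiltered 4 infos, a3 ++ pvFiltered 3 infos,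
         a2 ++ pvFiltered 2 infos, a1 ++ pvFiltered 1 infos,
         a0 ++ pvFiltered 0 infos) := by
  intro infos
  induction infos with
  | nil => intro a4 a3 a2 a1 a0; simp [pvFiltered]
  | cons i t ih =>
    intro a4 a3 a2 a1 a0
    by_cases h4 : PySem.List.pyGet? i 4 = some 4
    · simp [List.foldl_cons, pvStepB, h4, ih, pvFiltered]
    · by_cases h3 : PySem.List.pyGet? i 4 = some 3
      · simp [List.foldl_cons, pvStepB, h3, ih, pvFiltered]
      · by_cases h2 : PySem.List.pyGet? i 4 = some 2
        · simp [List.foldl_cons, pvStepB, h2, ih, pvFiltered]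
        · by_cases h1 : PySem.List.pyGet? i 4 = some 1
          · simp [List.foldl_cons, pvStepB, h1, ih, pvFiltered]
          · by_cases h0 : PySem.List.pyGet? i 4 = some 0
            · simp [List.foldl_cons, pvStepB, h0, ih, pvFiltered]
            · simp [List.foldl_cons, pvStepB, h4, h3, h2, h1, h0, ih, pvFiltered]

-- ===== VERDICT (by name: the statement is the Claim_ definition above) =====
theorem get_informations_by_score_spec : Claim_equal_get_informations_by_score := by
  intro informations _ _
  unfold Spec_get_informations_by_score
  unfold get_informations_by_score get_informations_by_score_alt
  simp only [pvLoopA_eq, pvLoopB_eq, List.nil_append, List.length_nil, Nat.sub_zero]
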